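-- pv_equiv track=rewrite | github.com/TimRathert/leetcode | python/cont-subarray-sum.py | checkSubArray
-- ===== SOURCE A (Python) =====
-- def checkSubArray(nums, k):
--     hashmap = {0: 0}
--     s = 0
--     for i in range(len(nums)):
--         s += nums[i]
--         if s % k not in hashmap:
--             hashmap[s % k] = i + 1
--         elif hashmap[s % k] < i:
--             return True
-- ===== SOURCE B (Python) =====
-- def checkSubArray(nums, k):
--     # precompute prefix-sum remainders, then scan index pairs with gap >= 2
--     rem = [0]
--     s = 0
--     for x in nums:
--         s += x
--         rem.append(s % k)
--     n = len(rem)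
--     for q in range(2, n):
--         for p in range(q - 1):
--             if rem[p] == rem[q]:
--                 return True
-- ===== Notes on version B (the rewrite author's own statement) =====
-- stated objective: alternative
-- what changed: Replaces the single-pass first-occurrence hashmap with a precompute-then-scan strategy: build the list of prefix-sum remainders once, then run a nested pairwise scan over index pairs at distance >= 2.
import Mathlib
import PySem

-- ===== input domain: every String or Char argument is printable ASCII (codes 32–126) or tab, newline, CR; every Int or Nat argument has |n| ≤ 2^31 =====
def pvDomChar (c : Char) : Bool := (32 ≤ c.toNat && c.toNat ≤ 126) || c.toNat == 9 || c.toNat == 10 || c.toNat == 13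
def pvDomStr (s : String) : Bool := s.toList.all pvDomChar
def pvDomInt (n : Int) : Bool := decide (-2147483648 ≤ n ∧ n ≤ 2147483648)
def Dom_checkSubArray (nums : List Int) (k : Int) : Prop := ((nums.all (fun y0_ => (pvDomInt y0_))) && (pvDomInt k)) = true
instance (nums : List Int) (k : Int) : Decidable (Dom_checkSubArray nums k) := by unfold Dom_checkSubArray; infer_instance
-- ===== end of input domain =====

-- B replaces A's single-pass hashmap with precomputing the prefix-remainder list and a nested pairwise scan (alternative decomposition, not faster).

-- ===== PORT A =====
-- A's loop: remaining elements, k, hashmap, running sum s, current index i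
def goA : List Int → Int → PySem.Dict Int Int → Int → Nat → Option Bool
  | [], _, _, _, _ => none
  | x :: xs, k, m, s, i =>
    let s' := s + x
    let r := PySem.Int.mod s' k
    match m.get? r with
    | none => goA xs k (m.insert r ((i : Int) + 1)) s' (i + 1)
    | some v => if v < (i : Int) then some true else goA xs k m s' (i + 1)

def checkSubArray (nums : List Int) (k : Int) : Option Bool :=
  goA nums k ((PySem.Dict.empty).insert 0 0) 0 0

-- ===== PORT B =====
-- B's first loop: remainders (s % k) of the growing prefix sum
def remsB : List Int → Int → Int → List Int
  | [], _, _ => []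
  | x :: xs, k, s => PySem.Int.mod (s + x) k :: remsB xs k (s + x)

-- B's nested scan over q in range(2, n), p in range(q-1); indices are in range so getD is exact
def checkSubArray_alt (nums : List Int) (k : Int) : Option Bool :=
  let rem := 0 :: remsB nums k 0
  let n := rem.length
  if (List.range' 2 (n - 2)).any (fun q =>
       (List.range (q - 1)).any (fun p => rem.getD p 0 == rem.getD q 0))
  then some true else none

-- ===== PRECONDITION & SPEC =====
-- Pre_ excludes k = 0 with nonempty nums: there Python A (and B) raise ZeroDivisionError.
def Pre_checkSubArray (nums : List Int) (k : Int) : Prop := k ≠ 0 ∨ nums = []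
instance (nums : List Int) (k : Int) : Decidable (Pre_checkSubArray nums k) := by
  unfold Pre_checkSubArray; infer_instance

def pvWitness_checkSubArray : List Int × Int := ([23, 2, 4, 6, 7], 6)

def Spec_checkSubArray (nums : List Int) (k : Int) (out : Option Bool) : Prop := out = checkSubArray_alt nums k
instance (nums : List Int) (k : Int) (out : Option Bool) : Decidable (Spec_checkSubArray nums k out) := by unfold Spec_checkSubArray; infer_instance

-- ===== CLAIM (what is proved, stated in full; the proofs are below) =====
def Claim_equal_checkSubArray : Prop := ∀ (nums : List Int) (k : Int), Dom_checkSubArray nums k → Pre_checkSubArray nums k → Spec_checkSubArray nums k (checkSubArray nums k)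

-- ===== LEMMAS AND PROOFS =====

-- common characterisation: a pair of prefix indices at distance ≥ 2 with equal remainders
def hasPair (L : List Int) : Bool :=
  (List.range L.length).any (fun q =>
    (List.range q).any (fun p => p + 2 ≤ q && L.getD p 0 == L.getD q 0))

lemma hasPair_iff (L : List Int) :
    hasPair L = true ↔ ∃ q < L.length, ∃ p, p + 2 ≤ q ∧ L.getD p 0 = L.getD q 0 := by
  simp only [hasPair, List.any_eq_true, List.mem_range, Bool.and_eq_true, decide_eq_true_eq,
    beq_iff_eq]
  constructor
  · rintro ⟨q, hq, p, hp, h2, he⟩; exact ⟨q, hq, p, h2, he⟩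
  · rintro ⟨q, hq, p, h2, he⟩; exact ⟨q, hq, p, by omega, h2, he⟩

lemma hasPair_false_iff (L : List Int) :
    hasPair L = false ↔ ∀ q < L.length, ∀ p, p + 2 ≤ q → L.getD p 0 ≠ L.getD q 0 := by
  rw [← Bool.not_eq_true, hasPair_iff]
  simp only [not_exists, not_and]

lemma getD_append_lt (l l' : List Int) (n : Nat) (h : n < l.length) :
    (l ++ l').getD n 0 = l.getD n 0 := by
  rw [List.getD_eq_getElem?_getD, List.getD_eq_getElem?_getD, List.getElem?_append_left h]

lemma getD_append_self (l l' : List Int) (r : Int) :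
    (l ++ r :: l').getD l.length 0 = r := by
  rw [List.getD_eq_getElem?_getD, List.getElem?_append_right (Nat.le_refl _)]
  simp

lemma mem_of_getD (l : List Int) (n : Nat) (h : n < l.length) : l.getD n 0 ∈ l := by
  rw [List.getD_eq_getElem l 0 h]
  exact List.getElem_mem h

lemma hasPair_snoc (L : List Int) (r : Int)
    (h0 : hasPair L = false) (hnew : ∀ p, p + 2 ≤ L.length → L.getD p 0 ≠ r) :
    hasPair (L ++ [r]) = false := by
  rw [hasPair_false_iff] at h0 ⊢
  intro q hq p hpq
  rw [List.length_append, List.length_cons] at hq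
  by_cases hqL : q < L.length
  · rw [getD_append_lt _ _ _ hqL, getD_append_lt _ _ _ (by omega)]
    exact h0 q hqL p hpq
  · have hqe : q = L.length := by simp at hq; omega
    subst hqe
    rw [getD_append_lt _ _ _ (by omega), getD_append_self]
    exact hnew p hpq

-- index? facts on an appended element
lemma index?_snoc_of_not_mem_ne (l : List Int) (r r' : Int) (h : r' ∉ l) (hne : r' ≠ r) :
    PySem.List.index? (l ++ [r]) r' = none := by
  rw [PySem.List.index?_eq_none_iff]
  simp [h, hne]

lemma index?_snoc_self_of_not_mem (l : List Int) (r : Int) (h : r ∉ l) :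
    PySem.List.index? (l ++ [r]) r = some l.length := by
  rw [PySem.List.index?_eq_some_iff]
  exact ⟨l, [], rfl, rfl, h⟩

lemma index?_snoc_of_some (l : List Int) (r r' : Int) (v : Nat)
    (h : PySem.List.index? l r' = some v) :
    PySem.List.index? (l ++ [r]) r' = some v := by
  rw [PySem.List.index?_eq_some_iff] at h ⊢
  obtain ⟨a, suf, hd, hl, hm⟩ := h
  exact ⟨a, suf ++ [r], by rw [hd]; simp, hl, hm⟩

lemma index?_spec (l : List Int) (r : Int) (v : Nat)
    (h : PySem.List.index? l r = some v) :
    v < l.length ∧ l.getD v 0 = r ∧ ∀ p < v, l.getD p 0 ≠ r := by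
  rw [PySem.List.index?_eq_some_iff] at h
  obtain ⟨a, suf, hd, hl, hm⟩ := h
  subst hd; subst hl
  refine ⟨by simp, getD_append_self a suf r, ?_⟩
  intro p hp
  rw [getD_append_lt _ _ _ hp]
  intro hc
  exact hm (hc ▸ mem_of_getD a p hp)

lemma goA_eq (xs : List Int) (k : Int) :
    ∀ (pre : List Int) (m : PySem.Dict Int Int) (s : Int) (i : Nat),
    (∀ r : Int, m.get? r = (PySem.List.index? pre r).map (fun n => (n : Int))) →
    i + 1 = pre.length →
    hasPair pre = false →
    goA xs k m s i = cond (hasPair (pre ++ remsB xs k s)) (some true) none := by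
  induction xs with
  | nil =>
    intro pre m s i _ _ hpre
    simp [goA, remsB, hpre]
  | cons x xs ih =>
    intro pre m s i hm hlen hpre
    have hassoc : pre ++ remsB (x :: xs) k s
        = (pre ++ [PySem.Int.mod (s + x) k]) ++ remsB xs k (s + x) := by
      simp [remsB]
    set r := PySem.Int.mod (s + x) k with hr
    cases hg : m.get? r with
    | none =>
      have hidx : PySem.List.index? pre r = none := by
        have h2 := (hm r).symm.trans hg
        cases h : PySem.List.index? pre r
        · rfl
        · rw [h] at h2; simp at h2
      have hnotmem : r ∉ pre := (PySem.List.index?_eq_none_iff pre r).mp hidx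
      have hstep : goA (x :: xs) k m s i
          = goA xs k (m.insert r ((i : Int) + 1)) (s + x) (i + 1) := by
        simp only [goA]
        rw [← hr, hg]
      rw [hstep, hassoc]
      apply ih (pre ++ [r]) _ (s + x) (i + 1)
      · intro r'
        by_cases he : r' = r
        · subst he
          rw [PySem.Dict.get?_insert_self, index?_snoc_self_of_not_mem pre r hnotmem]
          simp
          omega
        · rw [PySem.Dict.get?_insert_of_ne _ _ he, hm r']
          cases h : PySem.List.index? pre r' with
          | none =>
            have hnm : r' ∉ pre := (PySem.List.index?_eq_none_iff pre r').mp h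
            rw [index?_snoc_of_not_mem_ne pre r r' hnm he]
          | some v =>
            rw [index?_snoc_of_some pre r r' v h]
      · simp; omega
      · apply hasPair_snoc pre r hpre
        intro p hp hc
        exact hnotmem (hc ▸ mem_of_getD pre p (by omega))
    | some v =>
      have hidx : ∃ vn : Nat, PySem.List.index? pre r = some vn ∧ (vn : Int) = v := by
        have h2 := (hm r).symm.trans hg
        cases h : PySem.List.index? pre r
        · rw [h] at h2; simp at h2
        · rw [h] at h2; simp at h2; exact ⟨_, rfl, h2⟩
      obtain ⟨vn, hvn, hcast⟩ := hidx
      obtain ⟨hvlt, hvget, hvfirst⟩ := index?_spec pre r vn hvn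
      have hstep : goA (x :: xs) k m s i
          = if v < (i : Int) then some true else goA xs k m (s + x) (i + 1) := by
        simp only [goA]
        rw [← hr, hg]
      by_cases hlt : v < (i : Int)
      · rw [hstep, if_pos hlt]
        have htrue : hasPair (pre ++ remsB (x :: xs) k s) = true := by
          rw [hasPair_iff]
          refine ⟨pre.length, ?_, vn, by omega, ?_⟩
          · simp [remsB]
          · have h1 : (pre ++ remsB (x :: xs) k s).getD pre.length 0 = r := by
              simp only [remsB, ← hr]
              exact getD_append_self pre _ r
            have h2 : (pre ++ remsB (x :: xs) k s).getD vn 0 = r := by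
              rw [getD_append_lt _ _ _ hvlt, hvget]
            rw [h1, h2]
        rw [htrue]
        rfl
      · rw [hstep, if_neg hlt, hassoc]
        have hvi : vn = i := by omega
        apply ih (pre ++ [r]) m (s + x) (i + 1)
        · intro r'
          by_cases he : r' = r
          · subst he
            rw [hg, index?_snoc_of_some pre r r vn hvn]
            simp [hcast]
          · rw [hm r']
            cases h : PySem.List.index? pre r' with
            | none =>
              have hnm : r' ∉ pre := (PySem.List.index?_eq_none_iff pre r').mp h
              rw [index?_snoc_of_not_mem_ne pre r r' hnm he]
            | some w =>
              rw [index?_snoc_of_some pre r r' w h]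
        · simp; omega
        · apply hasPair_snoc pre r hpre
          intro p hp
          exact hvfirst p (by omega)

lemma checkSubArray_eq (nums : List Int) (k : Int) :
    checkSubArray nums k = cond (hasPair (0 :: remsB nums k 0)) (some true) none := by
  have h := goA_eq nums k [0] ((PySem.Dict.empty).insert 0 0) 0 0 ?_ (by simp) (by decide)
  · simpa [checkSubArray] using h
  · intro r
    by_cases h : r = 0
    · subst h
      rw [PySem.Dict.get?_insert_self, PySem.List.index?_cons_self]
      rfl
    · rw [PySem.Dict.get?_insert_of_ne _ _ h]
      have hn : PySem.List.index? [(0 : Int)] r = none := by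
        rw [PySem.List.index?_eq_none_iff]; simp [h]
      rw [hn]
      simp [PySem.Dict.empty, PySem.Dict.get?]

lemma checkSubArray_alt_eq (nums : List Int) (k : Int) :
    checkSubArray_alt nums k = cond (hasPair (0 :: remsB nums k 0)) (some true) none := by
  simp only [checkSubArray_alt]
  set L := (0 : Int) :: remsB nums k 0 with hL
  have hn : 1 ≤ L.length := by simp [hL]
  have hiff : ((List.range' 2 (L.length - 2)).any (fun q =>
      (List.range (q - 1)).any (fun p => L.getD p 0 == L.getD q 0)) = true)
      ↔ hasPair L = true := by
    rw [hasPair_iff]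
    simp only [List.any_eq_true, List.mem_range'_1, List.mem_range, beq_iff_eq]
    constructor
    · rintro ⟨q, ⟨h2, hq⟩, p, hp, he⟩
      exact ⟨q, by omega, p, by omega, he⟩
    · rintro ⟨q, hq, p, h2, he⟩
      exact ⟨q, ⟨by omega, by omega⟩, p, by omega, he⟩
  cases h : hasPair L with
  | false =>
    rw [h] at hiff
    simp only [Bool.false_eq_true, iff_false, Bool.not_eq_true] at hiff
    rw [hiff]
    rfl
  | true =>
    rw [h] at hiff
    rw [hiff.mpr rfl]
    rfl

-- ===== VERDICT (by name: the statement is the Claim_ definition above) =====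
theorem checkSubArray_spec : Claim_equal_checkSubArray := by
  intro nums k _ _
  unfold Spec_checkSubArray
  rw [checkSubArray_eq, checkSubArray_alt_eq]
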